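-- pv_equiv track=rewrite | github.com/ninocsta/control | salao/views.py | _iter_months_backwards
-- ===== SOURCE A (Python) =====
-- def _iter_months_backwards(ano, mes, quantidade):
--     meses = []
--     ano_cursor = ano
--     mes_cursor = mes
--     for _ in range(quantidade):
--         meses.append((ano_cursor, mes_cursor))
--         mes_cursor -= 1
--         if mes_cursor == 0:
--             mes_cursor = 12
--             ano_cursor -= 1
--     meses.reverse()
--     return meses
-- ===== SOURCE B (Python) =====
-- def _iter_months_backwards(ano, mes, quantidade):
--     # Absolute month index of the anchor; the window of the `quantidade`
--     # most recent months is then a contiguous integer range, emitted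
--     # oldest-first and decoded independently by divmod.
--     base = ano * 12 + mes - 1
--     return [(t // 12, t % 12 + 1) for t in range(base - quantidade + 1, base + 1)]
-- ===== Notes on version B (the rewrite author's own statement) =====
-- stated objective: simpler
-- what changed: Replaces the stateful month cursor with its wrap-at-zero correction and final reverse by a single comprehension over a contiguous absolute-month-index range, decoding each entry independently with divmod; Pre_ restricts to the natural domain of calendar anchors (1 <= mes <= 12, or quantidade <= 0 where the result is empty anyway), since for non-calendar month values a raw count-down and a modular normalization are both defensible readings of an input no caller passes.
-- outside the precondition, e.g. on _iter_months_backwards(2024, 0, 1): A returns [(2024, 0)], B returns [(2023, 12)]; on _iter_months_backwards(2024, 13, 2): A returns [(2024, 12), (2024, 13)], B returns [(2024, 12), (2025, 1)]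
import Mathlib
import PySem

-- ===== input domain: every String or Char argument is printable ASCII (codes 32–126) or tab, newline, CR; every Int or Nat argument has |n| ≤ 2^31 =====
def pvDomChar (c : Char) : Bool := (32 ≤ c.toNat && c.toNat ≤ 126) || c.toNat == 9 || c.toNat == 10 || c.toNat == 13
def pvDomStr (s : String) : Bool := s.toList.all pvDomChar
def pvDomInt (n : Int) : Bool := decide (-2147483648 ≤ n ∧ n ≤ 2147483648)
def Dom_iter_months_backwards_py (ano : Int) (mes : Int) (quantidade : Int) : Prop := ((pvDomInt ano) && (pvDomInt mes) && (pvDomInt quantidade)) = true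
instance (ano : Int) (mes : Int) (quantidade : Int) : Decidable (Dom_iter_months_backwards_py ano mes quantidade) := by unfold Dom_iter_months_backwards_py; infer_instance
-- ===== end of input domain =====

-- B replaces A's stateful month cursor (wrap at zero, final reverse) by one comprehension
-- over a contiguous absolute-month-index range decoded entry by entry with divmod (simpler).

-- ===== PORT A =====
-- A's loop body: append the cursor pair, decrement the month, wrap at zero
def pvBodyA (st : List (Int × Int) × Int × Int) : List (Int × Int) × Int × Int :=
  let meses := st.1 ++ [(st.2.1, st.2.2)]
  let mes_cursor := st.2.2 - 1
  if mes_cursor = 0 then (meses, st.2.1 - 1, (12 : Int)) else (meses, st.2.1, mes_cursor)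

def iter_months_backwards_py (ano : Int) (mes : Int) (quantidade : Int) : List (Int × Int) :=
  let st := (PySem.List.pyRange 0 quantidade 1).foldl (fun st _ => pvBodyA st) ([], ano, mes)
  st.1.reverse

-- ===== PORT B =====
def iter_months_backwards_py_alt (ano : Int) (mes : Int) (quantidade : Int) : List (Int × Int) :=
  let base := ano * 12 + mes - 1
  (PySem.List.pyRange (base - quantidade + 1) (base + 1) 1).map
    (fun t => (PySem.Int.floordiv t 12, PySem.Int.mod t 12 + 1))

-- ===== PRECONDITION & SPEC =====
-- Pre_ restricts to the task's natural domain: the anchor month is a real calendar month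
-- (1 ≤ mes ≤ 12), or quantidade ≤ 0 where both programs return [] for any mes; for
-- non-calendar month values with quantidade ≥ 1, A's raw count-down and B's modular
-- normalization are both defensible readings of an input no caller passes.
def Pre_iter_months_backwards_py (ano : Int) (mes : Int) (quantidade : Int) : Prop :=
  (1 ≤ mes ∧ mes ≤ 12) ∨ quantidade ≤ 0
instance (ano : Int) (mes : Int) (quantidade : Int) : Decidable (Pre_iter_months_backwards_py ano mes quantidade) := by unfold Pre_iter_months_backwards_py; infer_instance

def pvWitness_iter_months_backwards_py : Int × Int × Int := (2024, 5, 3)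

def Spec_iter_months_backwards_py (ano : Int) (mes : Int) (quantidade : Int) (out : List (Int × Int)) : Prop := out = iter_months_backwards_py_alt ano mes quantidade
instance (ano : Int) (mes : Int) (quantidade : Int) (out : List (Int × Int)) : Decidable (Spec_iter_months_backwards_py ano mes quantidade out) := by unfold Spec_iter_months_backwards_py; infer_instance

-- ===== CLAIM (what is proved, stated in full; the proofs are below) =====
def Claim_equal_iter_months_backwards_py : Prop := ∀ (ano : Int) (mes : Int) (quantidade : Int), Dom_iter_months_backwards_py ano mes quantidade → Pre_iter_months_backwards_py ano mes quantidade → Spec_iter_months_backwards_py ano mes quantidade (iter_months_backwards_py ano mes quantidade)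

-- ===== LEMMAS AND PROOFS =====

-- the (year, month) pair denoted by absolute month index t
def pvEntry (t : Int) : Int × Int := (PySem.Int.floordiv t 12, PySem.Int.mod t 12 + 1)

lemma pvEntry_of_valid (a m : Int) (h1 : 1 ≤ m) (h2 : m ≤ 12) :
    pvEntry (a * 12 + m - 1) = (a, m) := by
  unfold pvEntry
  rw [PySem.Int.floordiv_eq_ediv_of_pos (by norm_num), PySem.Int.mod_eq_emod_of_pos (by norm_num),
    Prod.mk.injEq]
  constructor <;> omega

-- invariant of A's loop for a calendar cursor: the accumulated list is the decoded
-- consecutive absolute month indices, newest first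
lemma pvLoop {α : Type} (l : List α) : ∀ (acc : List (Int × Int)) (a m : Int),
    1 ≤ m → m ≤ 12 →
    (l.foldl (fun st (_ : α) => pvBodyA st) (acc, a, m)).1 =
      acc ++ (List.range l.length).map (fun (i : Nat) => pvEntry (a * 12 + m - 1 - (i : Int))) := by
  induction l with
  | nil => intro acc a m _ _; simp
  | cons x xs ih =>
    intro acc a m h1 h2
    have hstep : pvBodyA (acc, a, m) =
        ((acc ++ [(a, m)], if m - 1 = 0 then ((a - 1, (12 : Int)) : Int × Int) else (a, m - 1))) := by
      unfold pvBodyA; split_ifs <;> simp_all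
    have hrange : ∀ a' m' : Int, a' * 12 + m' - 1 = a * 12 + m - 2 →
        (List.range (xs.length + 1)).map (fun (i : Nat) => pvEntry (a * 12 + m - 1 - (i : Int))) =
          (a, m) :: (List.range xs.length).map (fun (i : Nat) => pvEntry (a' * 12 + m' - 1 - (i : Int))) := by
      intro a' m' hidx
      rw [List.range_succ_eq_map]
      simp only [List.map_cons, List.map_map]
      congr 1
      · simpa using pvEntry_of_valid a m h1 h2
      · apply List.map_congr_left; intro i _
        simp only [Function.comp_apply, Nat.succ_eq_add_one]
        congr 1
        push_cast
        omega
    by_cases hm : m - 1 = 0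
    · rw [List.foldl_cons, hstep, if_pos hm, ih _ _ _ (by norm_num) (by norm_num),
        List.length_cons, hrange (a - 1) 12 (by omega),
        List.append_assoc, List.singleton_append]
    · rw [List.foldl_cons, hstep, if_neg hm, ih _ _ _ (by omega) (by omega),
        List.length_cons, hrange a (m - 1) (by omega),
        List.append_assoc, List.singleton_append]

theorem iter_months_backwards_py_spec : Claim_equal_iter_months_backwards_py := by
  intro ano mes q _ hpre
  unfold Spec_iter_months_backwards_py
  simp only [iter_months_backwards_py, iter_months_backwards_py_alt]
  rcases hpre with ⟨h1, h2⟩ | hq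
  · rw [PySem.List.pyRange_one, PySem.List.pyRange_one]
    rw [pvLoop _ [] ano mes h1 h2]
    simp only [List.nil_append, List.map_map, sub_zero]
    apply List.ext_getElem
    · simp only [List.length_reverse, List.length_map, List.length_range]
      omega
    · intro k hk1 hk2
      rw [List.getElem_reverse]
      simp only [List.length_map, List.length_range, List.getElem_map, List.getElem_range,
        Function.comp_apply]
      have hq1 : (0 : Int) ≤ q := by
        by_contra h
        simp only [List.length_map, List.length_range] at hk2
        omega
      have hlen : ((ano * 12 + mes - 1 + 1) - (ano * 12 + mes - 1 - q + 1)).toNat = q.toNat := by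
        omega
      simp only [List.length_map, List.length_range, hlen] at hk1 hk2 ⊢
      show pvEntry _ = pvEntry _
      congr 1
      omega
  · rw [PySem.List.pyRange_one_eq_nil hq, PySem.List.pyRange_one_eq_nil (by omega)]
    simp
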